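-- pv_equiv track=rewrite | github.com/NIKITA1212/DataStructure | ascii delete distance.py | ascii_deletion_distance
-- ===== SOURCE A (Python) =====
-- def ascii_deletion_distance(s1, s2):
--     l1, l2 = len(s1), len(s2)
--     dp = [[0] * (l2 + 1) for _ in range(l1 + 1)]
--     for i in range(l1):
--         for j in range(l2):
--             if s1[i] == s2[j]:
--                 dp[i + 1][j + 1] = dp[i][j] + ord(s1[i])
--             else:
--                 dp[i + 1][j + 1] = max(dp[i][j + 1], dp[i + 1][j])
--     result = sum(map(ord, s1 + s2)) - dp[l1][l2] * 2
--     return result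
-- ===== SOURCE B (Python) =====
-- def ascii_deletion_distance(s1, s2):
--     memo = {}
--
--     def best(i, j):
--         if i == 0 or j == 0:
--             return 0
--         key = (i, j)
--         if key in memo:
--             return memo[key]
--         if s1[i - 1] == s2[j - 1]:
--             v = best(i - 1, j - 1) + ord(s1[i - 1])
--         else:
--             v = max(best(i - 1, j), best(i, j - 1))
--         memo[key] = v
--         return v
--
--     return sum(map(ord, s1)) + sum(map(ord, s2)) - 2 * best(len(s1), len(s2))
-- ===== Notes on version B (the rewrite author's own statement) =====
-- stated objective: alternative
-- what changed: B replaces A's exhaustive bottom-up (l1+1)x(l2+1) nested-list table fill with a top-down recursive function best(i, j) memoized in a dict, computing only the subproblems the recursion actually demands.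
import Mathlib
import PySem

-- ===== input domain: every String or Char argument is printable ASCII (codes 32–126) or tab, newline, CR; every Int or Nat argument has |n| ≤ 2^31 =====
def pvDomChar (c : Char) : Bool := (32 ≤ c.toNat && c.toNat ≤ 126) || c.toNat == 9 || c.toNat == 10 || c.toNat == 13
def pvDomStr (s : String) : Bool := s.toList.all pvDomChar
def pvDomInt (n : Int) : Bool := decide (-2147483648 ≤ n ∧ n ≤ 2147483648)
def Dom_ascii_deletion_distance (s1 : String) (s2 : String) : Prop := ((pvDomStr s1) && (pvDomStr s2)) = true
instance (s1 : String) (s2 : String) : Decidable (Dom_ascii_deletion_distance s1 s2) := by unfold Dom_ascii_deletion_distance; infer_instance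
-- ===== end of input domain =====

-- B replaces A's exhaustive bottom-up table fill with a top-down recursive best(i, j)
-- memoized in a dict (demand-driven recursion); same asymptotic cost, not claimed faster.

-- ===== PORT A =====
-- dp[r][c] = v  on a nested list (r, c always in range in A, so List.set/getD are exact)
def pvSet2 (t : List (List Int)) (r c : Nat) (v : Int) : List (List Int) :=
  t.set r ((t.getD r []).set c v)

-- body of A's inner loop (j), literally: indices i, j, i+1, j+1 are all in range
def pvInnerA (c1 c2 : List Char) (i : Nat) (dp : List (List Int)) (j : Nat) : List (List Int) :=
  if c1.getD i ' ' == c2.getD j ' ' then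
    pvSet2 dp (i + 1) (j + 1) ((dp.getD i []).getD j 0 + ((c1.getD i ' ').toNat : Int))
  else
    pvSet2 dp (i + 1) (j + 1) (max ((dp.getD i []).getD (j + 1) 0) ((dp.getD (i + 1) []).getD j 0))

-- body of A's outer loop (i): 'for j in range(l2): …'  (range(n) for n ≥ 0 is List.range n)
def pvOuterA (c1 c2 : List Char) (dp : List (List Int)) (i : Nat) : List (List Int) :=
  (List.range c2.length).foldl (pvInnerA c1 c2 i) dp

def ascii_deletion_distance (s1 : String) (s2 : String) : Int :=
  let c1 := s1.toList
  let c2 := s2.toList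
  let l1 := c1.length
  let l2 := c2.length
  -- dp = [[0] * (l2 + 1) for _ in range(l1 + 1)]
  let dp0 : List (List Int) := List.replicate (l1 + 1) (List.replicate (l2 + 1) 0)
  let dp := (List.range l1).foldl (pvOuterA c1 c2) dp0
  -- sum(map(ord, s1 + s2)) - dp[l1][l2] * 2
  ((c1 ++ c2).map (fun c => (c.toNat : Int))).sum - ((dp.getD l1 []).getD l2 0) * 2

-- ===== PORT B =====
-- B's inner recursive function best(i, j) with its dict memo threaded through
-- (returns the value together with the updated memo); transliterates Source B's
-- 'if i == 0 or j == 0: return 0 / if key in memo: … / recurse, store, return'.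
def pvBestMemo (c1 c2 : List Char) :
    Nat → Nat → PySem.Dict (Int × Int) Int → Int × PySem.Dict (Int × Int) Int
  | 0, _, memo => (0, memo)
  | _ + 1, 0, memo => (0, memo)
  | i + 1, j + 1, memo =>
    match memo.get? (((i : Int) + 1), ((j : Int) + 1)) with
    | some v => (v, memo)
    | none =>
      if c1.getD i ' ' == c2.getD j ' ' then
        let r := pvBestMemo c1 c2 i j memo
        let v := r.1 + ((c1.getD i ' ').toNat : Int)
        (v, r.2.insert (((i : Int) + 1), ((j : Int) + 1)) v)
      else
        let r1 := pvBestMemo c1 c2 i (j + 1) memo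
        let r2 := pvBestMemo c1 c2 (i + 1) j r1.2
        let v := max r1.1 r2.1
        (v, r2.2.insert (((i : Int) + 1), ((j : Int) + 1)) v)
  termination_by i j _ => i + j

def ascii_deletion_distance_alt (s1 : String) (s2 : String) : Int :=
  let c1 := s1.toList
  let c2 := s2.toList
  (c1.map (fun c => (c.toNat : Int))).sum + (c2.map (fun c => (c.toNat : Int))).sum
    - 2 * (pvBestMemo c1 c2 c1.length c2.length PySem.Dict.empty).1

-- ===== PRECONDITION & SPEC =====
def Spec_ascii_deletion_distance (s1 : String) (s2 : String) (out : Int) : Prop := out = ascii_deletion_distance_alt s1 s2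
instance (s1 : String) (s2 : String) (out : Int) : Decidable (Spec_ascii_deletion_distance s1 s2 out) := by unfold Spec_ascii_deletion_distance; infer_instance

-- ===== CLAIM (what is proved, stated in full; the proofs are below) =====
def Claim_equal_ascii_deletion_distance : Prop := ∀ (s1 : String) (s2 : String), Dom_ascii_deletion_distance s1 s2 → Spec_ascii_deletion_distance s1 s2 (ascii_deletion_distance s1 s2)

-- ===== LEMMAS AND PROOFS =====

-- the common mathematical content: maximum ASCII-weight of a common subsequence of the
-- first i chars of c1 and the first j chars of c2 (the value A's dp[i][j] and B's memo[(i,j)] hold)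
def pvBest (c1 c2 : List Char) : Nat → Nat → Int
  | 0, _ => 0
  | _ + 1, 0 => 0
  | i + 1, j + 1 =>
    if c1.getD i ' ' == c2.getD j ' ' then
      pvBest c1 c2 i j + ((c1.getD i ' ').toNat : Int)
    else
      max (pvBest c1 c2 i (j + 1)) (pvBest c1 c2 (i + 1) j)
  termination_by i j => i + j

lemma pvBest_zero_left (c1 c2 : List Char) (j : Nat) : pvBest c1 c2 0 j = 0 := by
  cases j <;> simp [pvBest]

lemma pvBest_zero_right (c1 c2 : List Char) (i : Nat) : pvBest c1 c2 i 0 = 0 := by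
  cases i <;> simp [pvBest]

-- ---------- A side ----------

def pvTbl (l1 l2 : Nat) (f : Nat → Nat → Int) : List (List Int) :=
  (List.range (l1 + 1)).map (fun r => (List.range (l2 + 1)).map (f r))

lemma pv_set_map_range {α : Type} (g : Nat → α) (n i : Nat) (v : α) :
    ((List.range n).map g).set i v = (List.range n).map (fun r => if r = i then v else g r) := by
  apply List.ext_getElem
  · simp
  · intro k h1 _
    simp only [List.getElem_set, List.getElem_map, List.getElem_range] at *
    by_cases hk : k = i <;> simp [hk]
    omega

lemma pvTbl_get (l1 l2 : Nat) (f : Nat → Nat → Int) (r c : Nat) (h1 : r ≤ l1) (h2 : c ≤ l2) :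
    (((pvTbl l1 l2 f).getD r []).getD c 0) = f r c := by
  unfold pvTbl
  rw [PySem.List.getD_map_range _ _ _ _ (by omega), PySem.List.getD_map_range _ _ _ _ (by omega)]

lemma pvTbl_set (l1 l2 : Nat) (f : Nat → Nat → Int) (r c : Nat) (v : Int)
    (h1 : r ≤ l1) :
    pvSet2 (pvTbl l1 l2 f) r c v
      = pvTbl l1 l2 (fun r' c' => if r' = r ∧ c' = c then v else f r' c') := by
  unfold pvSet2 pvTbl
  rw [PySem.List.getD_map_range _ _ _ _ (by omega : r < l1 + 1)]
  rw [pv_set_map_range, pv_set_map_range]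
  apply List.map_congr_left
  intro r' _
  by_cases hr : r' = r
  · subst hr
    rw [if_pos rfl]
    apply List.map_congr_left
    intro c' _
    by_cases hc : c' = c <;> simp [hc]
  · simp only [if_neg hr]
    apply List.map_congr_left
    intro c' _
    simp [hr]

lemma pvTbl_congr (l1 l2 : Nat) (f g : Nat → Nat → Int)
    (h : ∀ r ≤ l1, ∀ c ≤ l2, f r c = g r c) : pvTbl l1 l2 f = pvTbl l1 l2 g := by
  unfold pvTbl
  apply List.map_congr_left
  intro r hr
  apply List.map_congr_left
  intro c hc
  exact h r (by simpa using Nat.lt_succ_iff.mp (List.mem_range.mp hr))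
           c (by simpa using Nat.lt_succ_iff.mp (List.mem_range.mp hc))

-- table contents after i full outer rows and j cells of row i+1
def pvGA (c1 c2 : List Char) (i j r c : Nat) : Int :=
  if r ≤ i then pvBest c1 c2 r c
  else if r = i + 1 ∧ c ≤ j then pvBest c1 c2 r c
  else 0

lemma pvInnerA_step (c1 c2 : List Char) (i m : Nat) (hi : i < c1.length) (hm : m < c2.length) :
    pvInnerA c1 c2 i (pvTbl c1.length c2.length (pvGA c1 c2 i m)) m
      = pvTbl c1.length c2.length (pvGA c1 c2 i (m + 1)) := by
  have hbest : pvBest c1 c2 (i + 1) (m + 1)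
      = if c1.getD i ' ' == c2.getD m ' ' then
          pvBest c1 c2 i m + ((c1.getD i ' ').toNat : Int)
        else max (pvBest c1 c2 i (m + 1)) (pvBest c1 c2 (i + 1) m) := by
    simp [pvBest]
  have hread1 : (((pvTbl c1.length c2.length (pvGA c1 c2 i m)).getD i []).getD m 0)
      = pvBest c1 c2 i m := by
    rw [pvTbl_get _ _ _ _ _ (by omega) (by omega)]; simp [pvGA]
  have hread2 : (((pvTbl c1.length c2.length (pvGA c1 c2 i m)).getD i []).getD (m + 1) 0)
      = pvBest c1 c2 i (m + 1) := by
    rw [pvTbl_get _ _ _ _ _ (by omega) (by omega)]; simp [pvGA]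
  have hread3 : (((pvTbl c1.length c2.length (pvGA c1 c2 i m)).getD (i + 1) []).getD m 0)
      = pvBest c1 c2 (i + 1) m := by
    rw [pvTbl_get _ _ _ _ _ (by omega) (by omega)]
    simp [pvGA]
  have hset : pvInnerA c1 c2 i (pvTbl c1.length c2.length (pvGA c1 c2 i m)) m
      = pvSet2 (pvTbl c1.length c2.length (pvGA c1 c2 i m)) (i + 1) (m + 1)
          (pvBest c1 c2 (i + 1) (m + 1)) := by
    unfold pvInnerA
    rw [hread1, hread2, hread3, hbest]
    split <;> rfl
  rw [hset, pvTbl_set _ _ _ _ _ _ (by omega)]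
  apply pvTbl_congr
  intro r _ c _
  unfold pvGA
  by_cases h1 : r = i + 1 ∧ c = m + 1
  · obtain ⟨h1a, h1b⟩ := h1
    subst h1a; subst h1b
    rw [if_pos ⟨rfl, rfl⟩, if_neg (by omega : ¬ (i + 1 ≤ i)),
        if_pos (⟨rfl, by omega⟩ : i + 1 = i + 1 ∧ m + 1 ≤ m + 1)]
  · rw [if_neg h1]
    by_cases h2 : r ≤ i
    · simp [h2]
    · rw [if_neg h2, if_neg h2]
      by_cases h3 : r = i + 1 ∧ c ≤ m
      · rw [if_pos h3, if_pos ⟨h3.1, by omega⟩]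
      · rw [if_neg h3, if_neg (by rintro ⟨ha, hb⟩; exact h1 ⟨ha, by omega⟩)]

lemma pvInnerA_fold (c1 c2 : List Char) (i : Nat) (hi : i < c1.length) :
    ∀ m ≤ c2.length,
      (List.range m).foldl (pvInnerA c1 c2 i) (pvTbl c1.length c2.length (pvGA c1 c2 i 0))
        = pvTbl c1.length c2.length (pvGA c1 c2 i m) := by
  intro m
  induction m with
  | zero => intro _; simp
  | succ m ih =>
    intro hm
    rw [List.range_succ, List.foldl_append, ih (by omega)]
    simpa using pvInnerA_step c1 c2 i m hi (by omega)

-- table contents between outer rows: rows 0..k hold pvBest, the rest are still 0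
def pvGA' (c1 c2 : List Char) (k r c : Nat) : Int :=
  if r ≤ k then pvBest c1 c2 r c else 0

lemma pvGA_zero (c1 c2 : List Char) (i : Nat) : pvGA c1 c2 i 0 = pvGA' c1 c2 i := by
  funext r c
  unfold pvGA pvGA'
  by_cases h1 : r ≤ i
  · simp [h1]
  · rw [if_neg h1, if_neg h1]
    by_cases h2 : r = i + 1 ∧ c ≤ 0
    · rw [if_pos h2]
      have : c = 0 := by omega
      subst this
      rw [pvBest_zero_right]
    · rw [if_neg h2]

lemma pvOuterA_fold (c1 c2 : List Char) :
    ∀ k ≤ c1.length,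
      (List.range k).foldl (pvOuterA c1 c2) (pvTbl c1.length c2.length (pvGA' c1 c2 0))
        = pvTbl c1.length c2.length (pvGA' c1 c2 k) := by
  intro k
  induction k with
  | zero => intro _; simp
  | succ k ih =>
    intro hk
    rw [List.range_succ, List.foldl_append, ih (by omega)]
    simp only [List.foldl_cons, List.foldl_nil]
    unfold pvOuterA
    rw [← pvGA_zero, pvInnerA_fold c1 c2 k (by omega) c2.length le_rfl]
    apply pvTbl_congr
    intro r _ c hc
    unfold pvGA pvGA'
    by_cases h1 : r ≤ k
    · simp [h1, show r ≤ k + 1 by omega]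
    · rw [if_neg h1]
      by_cases h2 : r = k + 1
      · rw [if_pos ⟨h2, hc⟩, if_pos (by omega)]
      · rw [if_neg (by tauto), if_neg (by omega)]

lemma pvTbl_zero (c1 c2 : List Char) :
    (List.replicate (c1.length + 1) (List.replicate (c2.length + 1) (0 : Int)))
      = pvTbl c1.length c2.length (pvGA' c1 c2 0) := by
  unfold pvTbl
  apply List.ext_getElem
  · simp
  · intro r h1 h2
    simp only [List.getElem_replicate, List.getElem_map, List.getElem_range]
    apply List.ext_getElem
    · simp
    · intro c h3 h4
      simp only [List.getElem_replicate, List.getElem_map, List.getElem_range]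
      unfold pvGA'
      split
      · rw [show r = 0 by omega, pvBest_zero_left]
      · rfl

lemma pvA_eval (s1 s2 : String) :
    ascii_deletion_distance s1 s2
      = ((s1.toList ++ s2.toList).map (fun c => (c.toNat : Int))).sum
          - pvBest s1.toList s2.toList s1.toList.length s2.toList.length * 2 := by
  have h1 : ascii_deletion_distance s1 s2
      = ((s1.toList ++ s2.toList).map (fun c => (c.toNat : Int))).sum
          - ((((List.range s1.toList.length).foldl (pvOuterA s1.toList s2.toList)
                (List.replicate (s1.toList.length + 1)
                  (List.replicate (s2.toList.length + 1) (0 : Int)))).getD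
              s1.toList.length []).getD s2.toList.length 0) * 2 := rfl
  rw [h1, pvTbl_zero, pvOuterA_fold s1.toList s2.toList s1.toList.length le_rfl,
      pvTbl_get _ _ _ _ _ le_rfl le_rfl]
  unfold pvGA'
  rw [if_pos le_rfl]

-- ---------- B side ----------

-- memo invariant: every stored value at a Nat-cast key is the corresponding pvBest value
def pvInvM (c1 c2 : List Char) (memo : PySem.Dict (Int × Int) Int) : Prop :=
  ∀ (a b : Nat) (v : Int), memo.get? ((a : Int), (b : Int)) = some v → v = pvBest c1 c2 a b

lemma pvInvM_empty (c1 c2 : List Char) : pvInvM c1 c2 PySem.Dict.empty := by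
  intro a b v h
  rw [PySem.Dict.get?_empty] at h
  cases h

lemma pvInvM_insert (c1 c2 : List Char) (memo : PySem.Dict (Int × Int) Int)
    (h : pvInvM c1 c2 memo) (i j : Nat) :
    pvInvM c1 c2 (memo.insert ((i : Int), (j : Int)) (pvBest c1 c2 i j)) := by
  intro a b v hv
  rw [PySem.Dict.get?_insert] at hv
  by_cases he : ((a : Int), (b : Int)) = ((i : Int), (j : Int))
  · rw [if_pos he] at hv
    have ha : a = i := by
      have := congrArg Prod.fst he; simp at this; omega
    have hb : b = j := by
      have := congrArg Prod.snd he; simp at this; omega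
    subst ha; subst hb
    exact (Option.some.inj hv).symm
  · rw [if_neg he] at hv
    exact h a b v hv

-- the memoized recursion returns pvBest and preserves the invariant
lemma pvBestMemo_correct (c1 c2 : List Char) :
    ∀ (n i j : Nat) (memo : PySem.Dict (Int × Int) Int), i + j ≤ n → pvInvM c1 c2 memo →
      (pvBestMemo c1 c2 i j memo).1 = pvBest c1 c2 i j
        ∧ pvInvM c1 c2 (pvBestMemo c1 c2 i j memo).2 := by
  intro n
  induction n with
  | zero =>
    intro i j memo hn h
    have hi : i = 0 := by omega
    subst hi
    have he : pvBestMemo c1 c2 0 j memo = (0, memo) := by rw [pvBestMemo]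
    exact ⟨by rw [he, pvBest_zero_left], by rw [he]; exact h⟩
  | succ n ih =>
    intro i j memo hn h
    match i, j with
    | 0, j =>
      have he : pvBestMemo c1 c2 0 j memo = (0, memo) := by rw [pvBestMemo]
      exact ⟨by rw [he, pvBest_zero_left], by rw [he]; exact h⟩
    | i + 1, 0 =>
      have he : pvBestMemo c1 c2 (i + 1) 0 memo = (0, memo) := by rw [pvBestMemo]
      exact ⟨by rw [he, pvBest_zero_right], by rw [he]; exact h⟩
    | i + 1, j + 1 =>
      rw [pvBestMemo]
      cases hm : memo.get? (((i : Int) + 1), ((j : Int) + 1)) with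
      | some v =>
        simp only []
        have hv : v = pvBest c1 c2 (i + 1) (j + 1) := by
          apply h (i + 1) (j + 1) v
          rw [show ((i + 1 : Nat) : Int) = (i : Int) + 1 by push_cast; ring,
              show ((j + 1 : Nat) : Int) = (j : Int) + 1 by push_cast; ring]
          exact hm
        exact ⟨hv, h⟩
      | none =>
        simp only []
        have hbest : pvBest c1 c2 (i + 1) (j + 1)
            = if c1.getD i ' ' == c2.getD j ' ' then
                pvBest c1 c2 i j + ((c1.getD i ' ').toNat : Int)
              else max (pvBest c1 c2 i (j + 1)) (pvBest c1 c2 (i + 1) j) := by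
          simp [pvBest]
        by_cases hc : c1.getD i ' ' == c2.getD j ' '
        · rw [if_pos hc]
          obtain ⟨hv1, hI1⟩ := ih i j memo (by omega) h
          constructor
          · simp only [hv1, hbest, if_pos hc]
          · have := pvInvM_insert c1 c2 (pvBestMemo c1 c2 i j memo).2 hI1 (i + 1) (j + 1)
            rw [show ((i + 1 : Nat) : Int) = (i : Int) + 1 by push_cast; ring,
                show ((j + 1 : Nat) : Int) = (j : Int) + 1 by push_cast; ring,
                show pvBest c1 c2 (i + 1) (j + 1)
                    = (pvBestMemo c1 c2 i j memo).1 + ((c1.getD i ' ').toNat : Int) by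
                  rw [hv1, hbest, if_pos hc]] at this
            exact this
        · rw [if_neg hc]
          obtain ⟨hv1, hI1⟩ := ih i (j + 1) memo (by omega) h
          obtain ⟨hv2, hI2⟩ := ih (i + 1) j (pvBestMemo c1 c2 i (j + 1) memo).2 (by omega) hI1
          constructor
          · simp only [hv1, hv2, hbest, if_neg hc]
          · have := pvInvM_insert c1 c2
              (pvBestMemo c1 c2 (i + 1) j (pvBestMemo c1 c2 i (j + 1) memo).2).2 hI2 (i + 1) (j + 1)
            rw [show ((i + 1 : Nat) : Int) = (i : Int) + 1 by push_cast; ring,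
                show ((j + 1 : Nat) : Int) = (j : Int) + 1 by push_cast; ring,
                show pvBest c1 c2 (i + 1) (j + 1)
                    = max (pvBestMemo c1 c2 i (j + 1) memo).1
                        (pvBestMemo c1 c2 (i + 1) j (pvBestMemo c1 c2 i (j + 1) memo).2).1 by
                  rw [hv1, hv2, hbest, if_neg hc]] at this
            exact this

lemma pvB_eval (s1 s2 : String) :
    ascii_deletion_distance_alt s1 s2
      = (s1.toList.map (fun c => (c.toNat : Int))).sum
          + (s2.toList.map (fun c => (c.toNat : Int))).sum
          - 2 * pvBest s1.toList s2.toList s1.toList.length s2.toList.length := by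
  have h := (pvBestMemo_correct s1.toList s2.toList
      (s1.toList.length + s2.toList.length) s1.toList.length s2.toList.length
      PySem.Dict.empty le_rfl (pvInvM_empty s1.toList s2.toList)).1
  show (s1.toList.map (fun c => (c.toNat : Int))).sum
      + (s2.toList.map (fun c => (c.toNat : Int))).sum
      - 2 * (pvBestMemo s1.toList s2.toList s1.toList.length s2.toList.length PySem.Dict.empty).1
    = _
  rw [h]

-- ===== VERDICT (by name: the statement is the Claim_ definition above) =====
theorem ascii_deletion_distance_spec : Claim_equal_ascii_deletion_distance := by
  intro s1 s2 _
  unfold Spec_ascii_deletion_distance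
  rw [pvA_eval, pvB_eval, List.map_append, List.sum_append]
  ring
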